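-- pv_equiv track=rewrite | github.com/katchalamele/Projet-Thematique-MSI | Simulateur1/Graph_export_version/couplesManager.py | allCouplesCompute
-- ===== SOURCE A (Python) =====
-- from itertools import combinations
--
-- def allCouplesCompute(minimum, maximum):
--     l = []
--     for i in range(minimum, maximum):
--         l.append(i)
--     couples = []
--     for i in combinations(l, 2):
--         couples.append(i)
--     return(couples)
-- ===== SOURCE B (Python) =====
-- def allCouplesCompute(minimum, maximum):
--     rev = []
--     for i in range(maximum - 1, minimum - 1, -1):
--         for j in range(maximum - 1, i, -1):
--             rev.append((i, j))
--     rev.reverse()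
--     return rev
-- ===== Notes on version B (the rewrite author's own statement) =====
-- stated objective: alternative
-- what changed: B builds the pair list back-to-front: it enumerates all pairs in reverse lexicographic order (both indices descending) into an accumulator and reverses it once at the end, instead of materializing the range and passing it to itertools.combinations.
import Mathlib
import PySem

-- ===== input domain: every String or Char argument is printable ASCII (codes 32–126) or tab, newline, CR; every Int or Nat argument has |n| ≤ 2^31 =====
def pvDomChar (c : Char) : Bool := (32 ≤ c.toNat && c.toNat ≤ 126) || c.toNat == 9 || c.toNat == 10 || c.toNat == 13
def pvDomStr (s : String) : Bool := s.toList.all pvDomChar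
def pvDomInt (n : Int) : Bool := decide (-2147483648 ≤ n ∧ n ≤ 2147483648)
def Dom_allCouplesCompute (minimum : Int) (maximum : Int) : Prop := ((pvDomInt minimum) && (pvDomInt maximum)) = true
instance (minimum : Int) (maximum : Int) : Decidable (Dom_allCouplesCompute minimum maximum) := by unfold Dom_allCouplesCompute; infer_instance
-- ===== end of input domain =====

-- B builds the pair list back-to-front (both indices descending) and reverses once, instead of range-materialisation + itertools.combinations; objective: alternative.

-- ===== PORT A =====
-- itertools.combinations(l, 2): pairs (l[i], l[j]) with i < j, in lexicographic index order.
def pvComb2 (l : List Int) : List (Int × Int) :=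
  match l with
  | [] => []
  | x :: xs => xs.map (fun y => (x, y)) ++ pvComb2 xs

def allCouplesCompute (minimum : Int) (maximum : Int) : List (Int × Int) :=
  let l := (PySem.List.pyRange minimum maximum 1).foldl (fun acc i => acc ++ [i]) []
  (pvComb2 l).foldl (fun couples i => couples ++ [i]) []

-- ===== PORT B =====
def allCouplesCompute_alt (minimum : Int) (maximum : Int) : List (Int × Int) :=
  ((PySem.List.pyRange (maximum - 1) (minimum - 1) (-1)).foldl
    (fun rev i =>
      (PySem.List.pyRange (maximum - 1) i (-1)).foldl
        (fun rev j => rev ++ [(i, j)]) rev)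
    []).reverse

-- ===== PRECONDITION & SPEC =====
def Spec_allCouplesCompute (minimum : Int) (maximum : Int) (out : List (Int × Int)) : Prop := out = allCouplesCompute_alt minimum maximum
instance (minimum : Int) (maximum : Int) (out : List (Int × Int)) : Decidable (Spec_allCouplesCompute minimum maximum out) := by unfold Spec_allCouplesCompute; infer_instance

-- ===== CLAIM (what is proved, stated in full; the proofs are below) =====
def Claim_equal_allCouplesCompute : Prop := ∀ (minimum : Int) (maximum : Int), Dom_allCouplesCompute minimum maximum → Spec_allCouplesCompute minimum maximum (allCouplesCompute minimum maximum)

-- ===== LEMMAS AND PROOFS =====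

theorem foldl_app_singleton {α β : Type} (f : β → α) (xs : List β) (acc : List α) :
    xs.foldl (fun a x => a ++ [f x]) acc = acc ++ xs.map f := by
  induction xs generalizing acc with
  | nil => simp
  | cons x xs ih => simp [List.foldl, ih, List.append_assoc]

-- A's side: comb2 of an ascending range is the flatMap of its rows.
theorem comb2_range_eq_flatMap (a b : Int) :
    pvComb2 (PySem.List.pyRange a b 1)
      = (PySem.List.pyRange a b 1).flatMap
          (fun i => (PySem.List.pyRange (i + 1) b 1).map (fun j => (i, j))) := by
  by_cases h : a < b
  · rw [PySem.List.pyRange_one_cons h]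
    simp only [pvComb2, List.flatMap_cons]
    rw [comb2_range_eq_flatMap (a + 1) b]
  · rw [PySem.List.pyRange_one_eq_nil (by omega)]
    simp [pvComb2]
termination_by (b - a).toNat
decreasing_by omega

-- B's side: the descending double loop builds exactly the reverse of that flatMap.
theorem altB_core (a b : Int) :
    (PySem.List.pyRange (b - 1) (a - 1) (-1)).foldl
      (fun rev i => (PySem.List.pyRange (b - 1) i (-1)).foldl
        (fun rev j => rev ++ [(i, j)]) rev) []
    = ((PySem.List.pyRange a b 1).flatMap
        (fun i => (PySem.List.pyRange (i + 1) b 1).map (fun j => (i, j)))).reverse := by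
  have hout : PySem.List.pyRange (b - 1) (a - 1) (-1)
      = (PySem.List.pyRange a b 1).reverse := by
    rw [PySem.List.pyRange_neg_one_eq_reverse]
    norm_num
  have hfold : ∀ (l : List Int) (acc : List (Int × Int)),
      l.foldl (fun rev i => (PySem.List.pyRange (b - 1) i (-1)).foldl
        (fun rev j => rev ++ [(i, j)]) rev) acc
      = acc ++ l.flatMap
          (fun i => (PySem.List.pyRange (b - 1) i (-1)).map (fun j => (i, j))) := by
    intro l
    induction l with
    | nil => simp
    | cons x xs ih =>
      intro acc
      simp only [List.foldl_cons, List.flatMap_cons]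
      rw [foldl_app_singleton (fun j => (x, j)) _ acc, ih, List.append_assoc]
  rw [hout, hfold, List.nil_append, List.reverse_flatMap]
  congr 1
  funext i
  rw [PySem.List.pyRange_neg_one_eq_reverse]
  norm_num

theorem foldl_app_id {α : Type} (xs acc : List α) :
    xs.foldl (fun a x => a ++ [x]) acc = acc ++ xs := by
  have := foldl_app_singleton (fun x : α => x) xs acc
  simpa using this

-- ===== VERDICT (by name: the statement is the Claim_ definition above) =====
theorem allCouplesCompute_spec : Claim_equal_allCouplesCompute := by
  intro minimum maximum _
  unfold Spec_allCouplesCompute allCouplesCompute allCouplesCompute_alt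
  rw [altB_core, List.reverse_reverse, foldl_app_id, List.nil_append,
    foldl_app_id, List.nil_append, comb2_range_eq_flatMap]
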